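-- pv_equiv track=rewrite | github.com/qrtt1/jenkins-inspector | jenkins_tools/credential_describers/file_credentials.py | parse_secret_output
-- ===== SOURCE A (Python) =====
-- from typing import Optional, Dict, Any
--
-- def parse_secret_output(output: str) -> Dict[str, Any]:
--     lines = output.strip().split("\n")
--     secret_data = {}
--
--     i = 0
--     while i < len(lines):
--         line = lines[i]
--         if line == "FILE_CONTENT_START":
--             content_lines = []
--             i += 1
--             while i < len(lines) and lines[i] != "FILE_CONTENT_END":
--                 content_lines.append(lines[i])
--                 i += 1
--             secret_data["file_content"] = "\n".join(content_lines)
--         i += 1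
--
--     return secret_data
-- ===== SOURCE B (Python) =====
-- def parse_secret_output(output: str):
--     lines = output.strip().split("\n")
--     # split lines into segments delimited by END-marker lines
--     segments = []
--     cur = []
--     for line in lines:
--         if line == "FILE_CONTENT_END":
--             segments.append(cur)
--             cur = []
--         else:
--             cur.append(line)
--     segments.append(cur)
--     # the last segment containing a START marker wins; content is what follows its first START
--     for seg in reversed(segments):
--         if "FILE_CONTENT_START" in seg:
--             return {"file_content": "\n".join(seg[seg.index("FILE_CONTENT_START") + 1:])}
--     return {}
-- ===== Notes on version B (the rewrite author's own statement) =====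
-- stated objective: alternative
-- what changed: Replaces A's index-driven nested while-loop state machine with a two-phase decomposition: split the lines into segments delimited by FILE_CONTENT_END lines, then scan the segments in reverse for the last one containing FILE_CONTENT_START and slice after its first START marker.
import Mathlib
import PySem

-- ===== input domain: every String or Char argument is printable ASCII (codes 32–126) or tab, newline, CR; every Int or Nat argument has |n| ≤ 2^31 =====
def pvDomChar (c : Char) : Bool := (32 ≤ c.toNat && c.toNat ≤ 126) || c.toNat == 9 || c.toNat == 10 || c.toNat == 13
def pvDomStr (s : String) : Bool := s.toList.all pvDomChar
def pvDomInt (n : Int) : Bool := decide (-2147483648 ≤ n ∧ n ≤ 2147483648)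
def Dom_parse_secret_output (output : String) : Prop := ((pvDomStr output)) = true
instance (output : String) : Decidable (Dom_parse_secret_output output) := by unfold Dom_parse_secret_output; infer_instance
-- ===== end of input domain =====

-- B restructures A's nested while-loop state machine into split-on-END-markers then reverse search
-- for the last segment containing the START marker (objective: alternative decomposition, same cost).

-- ===== PORT A =====
-- inner while loop: collect lines until "FILE_CONTENT_END"; returns (content_lines, remaining lines from the END marker on)
def pvCollectA : List String → List String × List String
  | [] => ([], [])
  | x :: xs =>
    if x = "FILE_CONTENT_END" then ([], x :: xs)
    else ((x :: (pvCollectA xs).1), (pvCollectA xs).2)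

theorem pvCollectA_len (xs : List String) : (pvCollectA xs).2.length ≤ xs.length := by
  induction xs with
  | nil => simp [pvCollectA]
  | cons x xs ih =>
    simp only [pvCollectA]
    split
    · simp
    · simpa using Nat.le_succ_of_le ih

-- outer while loop over the remaining lines, carrying the dict
def pvALoop : List String → PySem.Dict String String → PySem.Dict String String
  | [], d => d
  | l :: rest, d =>
    if l = "FILE_CONTENT_START" then
      pvALoop ((pvCollectA rest).2.drop 1)
        (d.insert "file_content" (PySem.Str.join "\n" (pvCollectA rest).1))
    else pvALoop rest d
termination_by ls _ => ls.length
decreasing_by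
  · have := pvCollectA_len rest
    simp only [List.length_drop, List.length_cons]
    omega
  · simp

def parse_secret_output (output : String) : List (String × String) :=
  let lines := (PySem.Str.split? (PySem.Str.strip output) "\n").getD []  -- split("\n"): sep ≠ "" so split? is some
  (pvALoop lines PySem.Dict.empty).items

-- ===== PORT B =====
-- loop body of B's first pass: accumulate (segments, cur) splitting on "FILE_CONTENT_END" lines
def pvSegStep (st : List (List String) × List String) (line : String) :
    List (List String) × List String :=
  if line = "FILE_CONTENT_END" then (st.1 ++ [st.2], []) else (st.1, st.2 ++ [line])

-- B's second pass: first segment (of the reversed list) containing "FILE_CONTENT_START" wins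
def pvFindSeg : List (List String) → List (String × String)
  | [] => []
  | seg :: rest =>
    if "FILE_CONTENT_START" ∈ seg then
      match PySem.List.index? seg "FILE_CONTENT_START" with
      | some j => [("file_content", PySem.Str.join "\n" (seg.drop (j + 1)))]  -- seg[j+1:] with 0 ≤ j+1: List.drop is exact
      | none => []  -- unreachable: guarded by the membership test
    else pvFindSeg rest

def parse_secret_output_alt (output : String) : List (String × String) :=
  let lines := (PySem.Str.split? (PySem.Str.strip output) "\n").getD []  -- split("\n"): sep ≠ "" so split? is some
  let p := lines.foldl pvSegStep ([], [])
  pvFindSeg (p.1 ++ [p.2]).reverse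

-- ===== PRECONDITION & SPEC =====
def Spec_parse_secret_output (output : String) (out : List (String × String)) : Prop := out = parse_secret_output_alt output
instance (output : String) (out : List (String × String)) : Decidable (Spec_parse_secret_output output out) := by unfold Spec_parse_secret_output; infer_instance

-- ===== CLAIM (what is proved, stated in full; the proofs are below) =====
def Claim_equal_parse_secret_output : Prop := ∀ (output : String), Dom_parse_secret_output output → Spec_parse_secret_output output (parse_secret_output output)

-- ===== LEMMAS AND PROOFS =====

-- mid-level spec: the content of the LAST block, following A's scan discipline
def pvM : List String → Option String
  | [] => none
  | l :: rest =>
    if l = "FILE_CONTENT_START" then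
      match pvM ((pvCollectA rest).2.drop 1) with
      | some c' => some c'
      | none => some (PySem.Str.join "\n" (pvCollectA rest).1)
    else pvM rest
termination_by ls => ls.length
decreasing_by
  · have := pvCollectA_len rest
    simp only [List.length_drop, List.length_cons]
    omega
  · simp

theorem pvALoop_eq_M (ls : List String) (d : PySem.Dict String String) :
    pvALoop ls d = (match pvM ls with
      | none => d
      | some c => d.insert "file_content" c) := by
  induction ls, d using pvALoop.induct with
  | case1 d => simp [pvALoop, pvM]
  | case2 rest d ih =>
    rw [pvALoop, pvM]
    rw [ih]
    cases hm : pvM ((pvCollectA rest).2.drop 1) with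
    | none => simp
    | some c' => simp [PySem.Dict.insert_insert_self]
  | case3 l rest d h ih =>
    rw [pvALoop, pvM]
    simp only [if_neg h]
    exact ih

-- simple recursive form of B's segmentation
def pvSegRec : List String → List (List String)
  | [] => [[]]
  | x :: xs =>
    if x = "FILE_CONTENT_END" then [] :: pvSegRec xs
    else (pvSegRec xs).modifyHead (x :: ·)

theorem pvSegRec_ne_nil (ls : List String) : pvSegRec ls ≠ [] := by
  induction ls with
  | nil => simp [pvSegRec]
  | cons x xs ih =>
    rw [pvSegRec]
    split
    · simp
    · cases h : pvSegRec xs with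
      | nil => exact absurd h ih
      | cons s ss => simp [List.modifyHead]

theorem pvSegFold (ls : List String) (segs : List (List String)) (cur : List String) :
    (ls.foldl pvSegStep (segs, cur)).1 ++ [(ls.foldl pvSegStep (segs, cur)).2]
      = segs ++ (pvSegRec ls).modifyHead (cur ++ ·) := by
  induction ls generalizing segs cur with
  | nil => simp [pvSegRec]
  | cons x xs ih =>
    rw [List.foldl_cons, pvSegRec, pvSegStep]
    split
    · rw [ih]
      cases h : pvSegRec xs <;> simp [List.modifyHead]
    · rw [ih]
      cases h : pvSegRec xs <;> simp [List.modifyHead]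

theorem pvFindSeg_append_ne (xs ys : List (List String)) (h : pvFindSeg xs ≠ []) :
    pvFindSeg (xs ++ ys) = pvFindSeg xs := by
  induction xs with
  | nil => simp [pvFindSeg] at h
  | cons seg rest ih =>
    rw [List.cons_append, pvFindSeg, pvFindSeg]
    rw [pvFindSeg] at h
    split
    · rfl
    · rename_i hmem
      rw [if_neg hmem] at h
      exact ih h

theorem pvFindSeg_append_nil (xs ys : List (List String)) (h : pvFindSeg xs = []) :
    pvFindSeg (xs ++ ys) = pvFindSeg ys := by
  induction xs with
  | nil => simp
  | cons seg rest ih =>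
    rw [List.cons_append, pvFindSeg]
    rw [pvFindSeg] at h
    split
    · rename_i hmem
      rw [if_pos hmem] at h
      rcases Option.isSome_iff_exists.1 ((PySem.List.index?_isSome_iff seg "FILE_CONTENT_START").2 hmem) with ⟨j, hj⟩
      rw [hj] at h
      simp at h
    · rename_i hmem
      rw [if_neg hmem] at h
      exact ih h

-- segmentation through the inner-collect decomposition
theorem pvSegRec_collect (ls : List String) :
    pvSegRec ls = (match (pvCollectA ls).2 with
      | [] => [(pvCollectA ls).1]
      | _ :: rest => (pvCollectA ls).1 :: pvSegRec rest) := by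
  induction ls with
  | nil => simp [pvSegRec, pvCollectA]
  | cons x xs ih =>
    rw [pvSegRec, pvCollectA]
    split
    · simp
    · rw [ih]
      cases h : (pvCollectA xs).2 <;> simp [List.modifyHead]

theorem pvFindSeg_cons_ne (l : String) (s : List String) (h : l ≠ "FILE_CONTENT_START") :
    pvFindSeg [l :: s] = pvFindSeg [s] := by
  by_cases hmem : "FILE_CONTENT_START" ∈ s
  · have hmem' : "FILE_CONTENT_START" ∈ l :: s := List.mem_cons_of_mem _ hmem
    rcases Option.isSome_iff_exists.1 ((PySem.List.index?_isSome_iff s "FILE_CONTENT_START").2 hmem) with ⟨j, hj⟩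
    simp only [pvFindSeg, if_pos hmem, if_pos hmem', PySem.List.index?_cons_of_ne s h, hj]
    simp
  · have hmem' : "FILE_CONTENT_START" ∉ l :: s := by simp [hmem, Ne.symm h]
    simp only [pvFindSeg, if_neg hmem, if_neg hmem']

theorem pvFindSeg_start_cons (c : List String) :
    pvFindSeg ["FILE_CONTENT_START" :: c] = [("file_content", PySem.Str.join "\n" c)] := by
  rw [pvFindSeg, if_pos List.mem_cons_self, PySem.List.index?_cons_self]
  simp

theorem pvMainB (ls : List String) :
    pvFindSeg (pvSegRec ls).reverse = (match pvM ls with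
      | none => []
      | some c => [("file_content", c)]) := by
  induction ls using pvM.induct with
  | case1 => simp [pvSegRec, pvFindSeg, pvM]
  | case2 xs c' heq ih =>
    have hM : pvM ("FILE_CONTENT_START" :: xs) = some c' := by rw [pvM, if_pos rfl, heq]
    rw [hM, pvSegRec, if_neg (by decide), pvSegRec_collect xs]
    cases hr : (pvCollectA xs).2 with
    | nil =>
      rw [hr] at heq
      simp [pvM] at heq
    | cons e r' =>
      rw [hr] at ih heq
      simp only [List.drop_succ_cons, List.drop_zero] at ih heq
      rw [heq] at ih
      simp only [List.modifyHead_cons, List.reverse_cons]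
      rw [pvFindSeg_append_ne _ _ (by rw [ih]; simp), ih]
  | case3 xs heq ih =>
    have hM : pvM ("FILE_CONTENT_START" :: xs)
        = some (PySem.Str.join "\n" (pvCollectA xs).1) := by rw [pvM, if_pos rfl, heq]
    rw [hM, pvSegRec, if_neg (by decide), pvSegRec_collect xs]
    cases hr : (pvCollectA xs).2 with
    | nil =>
      simp only [List.modifyHead_cons, List.reverse_singleton, pvFindSeg_start_cons]
    | cons e r' =>
      rw [hr] at ih heq
      simp only [List.drop_succ_cons, List.drop_zero] at ih heq
      rw [heq] at ih
      simp only [List.modifyHead_cons, List.reverse_cons]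
      rw [pvFindSeg_append_nil _ _ ih, pvFindSeg_start_cons]
  | case4 l rest h ih =>
    rw [pvM, if_neg h]
    by_cases he : l = "FILE_CONTENT_END"
    · subst he
      rw [pvSegRec, if_pos rfl, List.reverse_cons]
      cases hm : pvM rest with
      | some c' =>
        rw [hm] at ih
        rw [pvFindSeg_append_ne _ _ (by rw [ih]; simp), ih]
      | none =>
        rw [hm] at ih
        rw [pvFindSeg_append_nil _ _ ih]
        simp [pvFindSeg]
    · rw [pvSegRec, if_neg he]
      rcases hs : pvSegRec rest with _ | ⟨s₀, ss⟩
      · exact absurd hs (pvSegRec_ne_nil rest)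
      · rw [hs] at ih
        simp only [List.modifyHead_cons, List.reverse_cons]
        rw [List.reverse_cons] at ih
        cases hf : pvFindSeg ss.reverse with
        | nil =>
          rw [pvFindSeg_append_nil _ _ hf] at ih
          rw [pvFindSeg_append_nil _ _ hf, pvFindSeg_cons_ne l s₀ h, ih]
        | cons p ps =>
          have hne : pvFindSeg ss.reverse ≠ [] := by rw [hf]; simp
          rw [pvFindSeg_append_ne _ _ hne] at ih
          rw [pvFindSeg_append_ne _ _ hne, ih]


-- ===== VERDICT (by name: the statement is the Claim_ definition above) =====
theorem parse_secret_output_spec : Claim_equal_parse_secret_output := by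
  intro output _
  unfold Spec_parse_secret_output parse_secret_output parse_secret_output_alt
  generalize (PySem.Str.split? (PySem.Str.strip output) "\n").getD [] = lines
  dsimp only
  have h := pvSegFold lines [] []
  simp only [List.nil_append] at h
  rw [show (fun x : List String => x) = @id (List String) from rfl, List.modifyHead_id] at h
  rw [pvALoop_eq_M, h, id_eq, pvMainB]
  cases pvM lines <;> rfl
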